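-- pv_equiv track=rewrite | github.com/KINOX0924/Datadiving | Practice/Programmers/nickname.py | solution
-- ===== SOURCE A (Python) =====
-- def solution(nickname):
--     answer = ""
--     for letter in nickname:
--         if letter == "l":
--             answer += "I"
--         elif letter == "w":
--             answer += "vv"
--         elif letter == "W":
--             answer += "VV"
--         elif letter == "O":
--             answer += "0"
--         else:
--             answer += letter
--     if len(answer) < 3:
--         while len(answer) < 4 : answer += "o"
--         # answer += "o"
--     if len(answer) > 8:
--         answer = answer[:8]
--     return answer
-- ===== SOURCE B (Python) =====
-- _REPL = {'l': 'I', 'w': 'vv', 'W': 'VV', 'O': '0'}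
--
-- def _emit(nickname, i, budget):
--     # recursively emit replacement pieces until the 8-char budget is spent
--     if budget <= 0 or i >= len(nickname):
--         return ""
--     piece = _REPL.get(nickname[i], nickname[i])
--     return piece[:budget] + _emit(nickname, i + 1, budget - len(piece))
--
-- def solution(nickname):
--     answer = _emit(nickname, 0, 8)
--     if len(answer) < 3:
--         answer += 'o' * (4 - len(answer))
--     return answer
-- ===== Notes on version B (the rewrite author's own statement) =====
-- stated objective: faster
-- what changed: Instead of translating the whole string and truncating at the end, B recursively emits replacement pieces under a remaining budget of 8 output characters and stops as soon as the budget is spent (lazy truncation), then pads arithmetically; it never builds the full translated string.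
import Mathlib
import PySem

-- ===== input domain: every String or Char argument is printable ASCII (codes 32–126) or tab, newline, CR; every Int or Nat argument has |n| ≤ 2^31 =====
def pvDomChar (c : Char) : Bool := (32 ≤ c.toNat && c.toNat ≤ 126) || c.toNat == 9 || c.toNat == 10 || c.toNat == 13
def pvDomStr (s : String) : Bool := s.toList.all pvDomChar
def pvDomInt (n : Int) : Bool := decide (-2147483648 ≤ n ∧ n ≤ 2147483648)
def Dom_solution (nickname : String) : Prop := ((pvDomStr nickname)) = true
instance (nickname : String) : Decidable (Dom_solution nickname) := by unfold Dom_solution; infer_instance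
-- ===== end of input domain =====

-- B replaces A's translate-everything-then-truncate pass by a budgeted recursion that
-- stops after emitting 8 output characters (lazy truncation), then pads arithmetically.

-- ===== PORT A =====
-- the body of A's for-loop: append the replacement of one letter
def pvAStep (ans : List Char) (letter : Char) : List Char :=
  if letter = 'l' then ans ++ ['I']
  else if letter = 'w' then ans ++ ['v', 'v']
  else if letter = 'W' then ans ++ ['V', 'V']
  else if letter = 'O' then ans ++ ['0']
  else ans ++ [letter]

-- A's padding loop (terminates: length grows)
def pvAPad (ans : List Char) : List Char :=
  if h : ans.length < 4 then pvAPad (ans ++ ['o']) else ans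
termination_by 4 - ans.length
decreasing_by simp; omega

def solution (nickname : String) : String :=
  let answer := nickname.toList.foldl pvAStep []
  let answer := if answer.length < 3 then pvAPad answer else answer
  let answer := if answer.length > 8 then answer.take 8 else answer
  String.mk answer

-- ===== PORT B =====
-- the replacement piece for one character (the _REPL.get of Source B)
def pvBRepl (c : Char) : List Char :=
  match c with
  | 'l' => ['I']
  | 'w' => ['v', 'v']
  | 'W' => ['V', 'V']
  | 'O' => ['0']
  | _   => [c]

-- Source B's _emit: recursion over the string with a remaining output budget
def pvEmit (l : List Char) (budget : Nat) : List Char :=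
  match l, budget with
  | [], _ => []
  | _ :: _, 0 => []
  | c :: rest, b + 1 =>
    let piece := pvBRepl c
    piece.take (b + 1) ++ pvEmit rest (b + 1 - piece.length)

def solution_alt (nickname : String) : String :=
  let answer := pvEmit nickname.toList 8
  let answer := if answer.length < 3 then answer ++ List.replicate (4 - answer.length) 'o' else answer
  String.mk answer

-- ===== PRECONDITION & SPEC =====
def Spec_solution (nickname : String) (out : String) : Prop := out = solution_alt nickname
instance (nickname : String) (out : String) : Decidable (Spec_solution nickname out) := by unfold Spec_solution; infer_instance

-- ===== CLAIM (what is proved, stated in full; the proofs are below) =====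
def Claim_equal_solution : Prop := ∀ (nickname : String), Dom_solution nickname → Spec_solution nickname (solution nickname)

-- ===== LEMMAS AND PROOFS =====
theorem pvAStep_eq_append (ans : List Char) (c : Char) : pvAStep ans c = ans ++ pvBRepl c := by
  unfold pvAStep pvBRepl
  split_ifs with h1 h2 h3 h4 <;> subst_eqs <;> first | rfl | (split <;> simp_all)

theorem pvAPad_eq (ans : List Char) :
    pvAPad ans = ans ++ List.replicate (4 - ans.length) 'o' := by
  by_cases h : ans.length < 4
  · rw [pvAPad, dif_pos h, pvAPad_eq (ans ++ ['o'])]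
    have : 4 - ans.length = (4 - (ans ++ ['o']).length) + 1 := by simp; omega
    simp [this, List.replicate_succ]
  · rw [pvAPad, dif_neg h]
    have : 4 - ans.length = 0 := by omega
    simp [this]
termination_by 4 - ans.length
decreasing_by simp; omega

theorem pvLoop_eq_flatMap (l : List Char) :
    l.foldl pvAStep [] = l.flatMap pvBRepl := by
  have hfun : pvAStep = fun acc c => acc ++ pvBRepl c :=
    funext fun a => funext fun c => pvAStep_eq_append a c
  rw [hfun, PySem.List.foldl_append_eq_flatMap, List.nil_append]

-- the budgeted recursion computes exactly the first `budget` chars of the full translation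
theorem pvEmit_eq_take (l : List Char) (b : Nat) :
    pvEmit l b = (l.flatMap pvBRepl).take b := by
  induction l generalizing b with
  | nil => cases b <;> rfl
  | cons c rest ih =>
    cases b with
    | zero => rfl
    | succ b =>
      rw [pvEmit, ih]
      simp only [List.flatMap_cons, List.take_append]

-- ===== VERDICT (by name: the statement is the Claim_ definition above) =====
theorem solution_spec : Claim_equal_solution := by
  intro nickname _
  simp only [Spec_solution, solution, solution_alt, pvLoop_eq_flatMap, pvEmit_eq_take]
  set full := nickname.toList.flatMap pvBRepl with hfull
  by_cases h : full.length < 3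
  · have ht : List.take 8 full = full := List.take_of_length_le (by omega)
    rw [ht, if_pos h, if_pos h, pvAPad_eq, if_neg (by simp; omega)]
  · have h' : ¬ (full.take 8).length < 3 := by
      simp [List.length_take]; omega
    rw [if_neg h, if_neg h']
    by_cases h8 : full.length > 8
    · rw [if_pos h8]
    · rw [if_neg h8, List.take_of_length_le (by omega)]
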